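-- pv_equiv track=rewrite | github.com/frederico-starcom/projetostarcom | gerarxml/main.py | Validatessize
-- ===== SOURCE A (Python) =====
-- def Validatessize(value, size):
--     line = ''
--     if len(value) < size:
--         newline = line + value
--         while len(newline) != size:
--             line += '0'
--             newline = line + value
--         return newline
--     else:
--         return value
-- ===== SOURCE B (Python) =====
-- def Validatessize(value, size):
--     return '0' * (size - len(value)) + value
-- ===== Notes on version B (the rewrite author's own statement) =====
-- stated objective: simpler
-- what changed: Replaced the incremental while-loop that rebuilds the padded string one '0' at a time with a single closed-form pad '0'*(size-len(value))+value, where a non-positive repeat count yields the empty string so no branch is needed.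
import Mathlib
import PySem

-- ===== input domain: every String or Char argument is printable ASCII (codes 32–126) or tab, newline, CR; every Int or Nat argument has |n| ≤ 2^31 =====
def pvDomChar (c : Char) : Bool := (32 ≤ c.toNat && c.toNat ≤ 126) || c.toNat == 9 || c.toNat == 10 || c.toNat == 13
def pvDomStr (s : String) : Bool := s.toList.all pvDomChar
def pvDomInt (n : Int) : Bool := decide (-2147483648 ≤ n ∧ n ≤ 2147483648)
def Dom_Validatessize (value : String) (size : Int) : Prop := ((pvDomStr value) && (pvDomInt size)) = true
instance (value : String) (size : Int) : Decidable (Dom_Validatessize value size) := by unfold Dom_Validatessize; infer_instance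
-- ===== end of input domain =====

-- B replaces A's incremental zero-appending while-loop with the closed-form pad '0'*(size-len(value))+value (objective: simpler).

-- ===== PORT A =====
-- the 'while len(newline) != size: line += "0"; newline = line + value' loop;
-- fuel bounds the iteration count (size.toNat suffices whenever len(value) < size,
-- which is the only way A reaches the loop)
def pvPadLoopA (value : String) (size : Int) : Nat → String → String
  | 0, line => line ++ value
  | fuel + 1, line =>
      if ((line ++ value).length : Int) = size then line ++ value
      else pvPadLoopA value size fuel (line ++ "0")

def Validatessize (value : String) (size : Int) : String :=
  let line := ""
  if (value.length : Int) < size then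
    let newline := line ++ value
    if (newline.length : Int) = size then newline
    else pvPadLoopA value size size.toNat (line ++ "0")
  else value

-- ===== PORT B =====
def Validatessize_alt (value : String) (size : Int) : String :=
  String.ofList (List.replicate (size - (value.length : Int)).toNat '0') ++ value

-- ===== PRECONDITION & SPEC =====
def Spec_Validatessize (value : String) (size : Int) (out : String) : Prop := out = Validatessize_alt value size
instance (value : String) (size : Int) (out : String) : Decidable (Spec_Validatessize value size out) := by unfold Spec_Validatessize; infer_instance

-- ===== CLAIM (what is proved, stated in full; the proofs are below) =====
def Claim_equal_Validatessize : Prop := ∀ (value : String) (size : Int), Dom_Validatessize value size → Spec_Validatessize value size (Validatessize value size)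

-- ===== LEMMAS AND PROOFS =====

theorem pvPadLoopA_eq (value : String) (size : Int) :
    ∀ (fuel k : Nat) (line : String), k ≤ fuel →
      ((line ++ value).length : Int) + k = size →
      pvPadLoopA value size fuel line = line ++ String.ofList (List.replicate k '0') ++ value := by
  intro fuel
  induction fuel with
  | zero =>
      intro k line hk hlen
      interval_cases k
      simp [pvPadLoopA]
  | succ n ih =>
      intro k line hk hlen
      cases k with
      | zero =>
          have hg : ((line ++ value).length : Int) = size := by omega
          rw [pvPadLoopA, if_pos hg, ← String.toList_inj]
          simp
      | succ k' =>
          have hne : ((line ++ value).length : Int) ≠ size := by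
            push_cast at hlen; omega
          have h0 : ("0" : String).length = 1 := rfl
          rw [pvPadLoopA, if_neg hne, ih k' (line ++ "0") (by omega)
                (by simp [String.length_append, h0] at hlen ⊢; omega)]
          have : line ++ "0" ++ String.ofList (List.replicate k' '0')
              = line ++ String.ofList (List.replicate (k' + 1) '0') := by
            rw [← String.toList_inj]; simp [List.replicate_succ]
          rw [this]

theorem Validatessize_spec : Claim_equal_Validatessize := by
  unfold Claim_equal_Validatessize Spec_Validatessize
  intro value size _
  unfold Validatessize Validatessize_alt
  by_cases hlt : (value.length : Int) < size
  · simp only [if_pos hlt]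
    by_cases heq : ((("" : String) ++ value).length : Int) = size
    · simp at heq
      have : (size - (value.length : Int)).toNat = 0 := by omega
      simp [heq]
    · simp only [if_neg heq]
      have h0 : ("0" : String).length = 1 := rfl
      have hk : ((("" : String) ++ "0" ++ value).length : Int) + ((size - (value.length : Int)).toNat - 1 : Nat) = size := by
        simp [String.length_append, h0]
        omega
      rw [pvPadLoopA_eq value size size.toNat ((size - (value.length : Int)).toNat - 1) _ (by omega) hk]
      have hrep : (size - (value.length : Int)).toNat = ((size - (value.length : Int)).toNat - 1) + 1 := by omega
      rw [hrep, ← String.toList_inj]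
      simp [List.replicate_succ]
  · simp only [if_neg hlt]
    have : (size - (value.length : Int)).toNat = 0 := by
      simp at hlt; omega
    rw [this, ← String.toList_inj]
    simp
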